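-- pv_equiv track=rewrite | github.com/louisottaway11/FusionFormatter | fusion_gcode_formatter.py | strip_preamble
-- ===== SOURCE A (Python) =====
-- def strip_preamble(lines: list[str]) -> tuple[str, list[str]]:
--     """Strip everything before first tool; return program number."""
--     cleaned = []
--     program_number = None
--     found_tool = False
--     for line in lines:
--         s = line.strip()
--         if not s or s == "%":
--             continue
--         if s.startswith("O") and s[1:].isdigit():
--             program_number = s
--         if s.startswith("T") and s[1:3].isdigit():
--             found_tool = True
--         if found_tool:
--             cleaned.append(s)
--     if not program_number:
--         program_number = "O0000"
--     return program_number, cleaned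
-- ===== SOURCE B (Python) =====
-- def strip_preamble(lines: list[str]) -> tuple[str, list[str]]:
--     """Strip everything before first tool; return program number."""
--     stripped = [line.strip() for line in lines]
--     idx = next((i for i, s in enumerate(stripped)
--                 if s.startswith("T") and s[1:3].isdigit()), len(stripped))
--     cleaned = [s for s in stripped[idx:] if s and s != "%"]
--     program_number = next((s for s in reversed(stripped)
--                            if s.startswith("O") and s[1:].isdigit()), "O0000")
--     return program_number, cleaned
-- ===== Notes on version B (the rewrite author's own statement) =====
-- stated objective: alternative
-- what changed: Replaces the single fused accumulator loop (flags found_tool/program_number carried together) with independent phases: locate the first tool line, filter the suffix from there, and scan from the end for the last program-number line.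
import Mathlib
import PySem

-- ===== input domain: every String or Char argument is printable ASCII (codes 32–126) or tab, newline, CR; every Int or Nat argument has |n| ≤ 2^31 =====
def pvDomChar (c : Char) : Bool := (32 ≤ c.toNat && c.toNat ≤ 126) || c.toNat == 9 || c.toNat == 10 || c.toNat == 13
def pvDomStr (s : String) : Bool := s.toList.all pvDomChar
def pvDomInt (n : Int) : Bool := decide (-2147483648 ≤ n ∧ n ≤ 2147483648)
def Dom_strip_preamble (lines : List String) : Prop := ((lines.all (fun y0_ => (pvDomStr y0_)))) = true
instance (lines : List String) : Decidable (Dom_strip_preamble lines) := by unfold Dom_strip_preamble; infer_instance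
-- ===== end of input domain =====

-- B restructures A's fused accumulator loop into independent locate/filter/last-scan phases; same cost, plainer data flow.

-- shared tests (both Pythons contain these exact expressions)
def pvIsProg (s : String) : Bool :=
  PySem.Str.startswith s "O" && PySem.Str.strIsdigit (PySem.Str.slice s (some 1) none)
def pvIsTool (s : String) : Bool :=
  PySem.Str.startswith s "T" && PySem.Str.strIsdigit (PySem.Str.slice s (some 1) (some 3))

-- ===== PORT A =====
def pvAStep (acc : List String × Option String × Bool) (line : String) :
    List String × Option String × Bool :=
  let s := PySem.Str.strip line
  if s == "" || s == "%" then acc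
  else
    let pn := if pvIsProg s then some s else acc.2.1
    let ft := if pvIsTool s then true else acc.2.2
    if ft then (acc.1 ++ [s], pn, ft) else (acc.1, pn, ft)

def strip_preamble (lines : List String) : String × List String :=
  let st := lines.foldl pvAStep ([], none, false)
  (match st.2.1 with | some p => p | none => "O0000", st.1)

-- ===== PORT B =====
def pvFindToolIdx : List String → Nat
  | [] => 0
  | s :: rest => if pvIsTool s then 0 else pvFindToolIdx rest + 1

def strip_preamble_alt (lines : List String) : String × List String :=
  let stripped := lines.map PySem.Str.strip
  let idx := pvFindToolIdx stripped
  let cleaned := (stripped.drop idx).filter (fun s => !(s == "" || s == "%"))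
  let pn := (stripped.reverse.find? pvIsProg).getD "O0000"
  (pn, cleaned)

-- ===== PRECONDITION & SPEC =====
def Spec_strip_preamble (lines : List String) (out : String × List String) : Prop := out = strip_preamble_alt lines
instance (lines : List String) (out : String × List String) : Decidable (Spec_strip_preamble lines out) := by unfold Spec_strip_preamble; infer_instance

-- ===== CLAIM (what is proved, stated in full; the proofs are below) =====
def Claim_equal_strip_preamble : Prop := ∀ (lines : List String), Dom_strip_preamble lines → Spec_strip_preamble lines (strip_preamble lines)

-- ===== LEMMAS AND PROOFS =====

lemma pvBlank_not_tool_prog {s : String} (h : s == "" || s == "%") :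
    pvIsTool s = false ∧ pvIsProg s = false := by
  rcases Bool.or_eq_true_iff.mp h with h | h <;>
    simp only [beq_iff_eq] at h <;> subst h <;> exact ⟨by decide, by decide⟩

lemma pvAStep_eq (cleaned : List String) (pn : Option String) (ft : Bool) (line : String) :
    pvAStep (cleaned, pn, ft) line =
      if PySem.Str.strip line == "" || PySem.Str.strip line == "%" then (cleaned, pn, ft)
      else (if (if pvIsTool (PySem.Str.strip line) then true else ft)
              then cleaned ++ [PySem.Str.strip line] else cleaned,
            if pvIsProg (PySem.Str.strip line) then some (PySem.Str.strip line) else pn,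
            if pvIsTool (PySem.Str.strip line) then true else ft) := by
  simp only [pvAStep]
  split
  · rfl
  · split <;> cases ft <;> rfl

lemma pvFold_inv (ls : List String) :
    ∀ (cleaned : List String) (pn : Option String) (ft : Bool),
    ls.foldl pvAStep (cleaned, pn, ft) =
      (cleaned ++ (if ft then ls.map PySem.Str.strip
          else (ls.map PySem.Str.strip).drop (pvFindToolIdx (ls.map PySem.Str.strip))).filter
            (fun s => !(s == "" || s == "%")),
       ((ls.map PySem.Str.strip).reverse.find? pvIsProg).or pn,
       ft || (ls.map PySem.Str.strip).any pvIsTool) := by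
  induction ls with
  | nil => intro cleaned pn ft; cases ft <;> simp [pvFindToolIdx]
  | cons l rest ih =>
    intro cleaned pn ft
    rw [List.foldl_cons, pvAStep_eq]
    simp only [List.map_cons, List.reverse_cons, List.find?_append, List.any_cons]
    generalize PySem.Str.strip l = s
    have hfind1 : List.find? pvIsProg [s] = if pvIsProg s then some s else none := by
      cases h : pvIsProg s <;> simp [List.find?, h]
    by_cases hblank : (s == "" || s == "%") = true
    · obtain ⟨ht, hp⟩ := pvBlank_not_tool_prog hblank
      rw [if_pos hblank, ih]
      rcases Bool.or_eq_true_iff.mp hblank with h | h <;> cases ft <;>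
        simp [pvFindToolIdx, ht, hp, hfind1, List.drop_succ_cons, h]
    · rw [if_neg hblank]
      simp only [Bool.or_eq_true, beq_iff_eq, not_or] at hblank
      obtain ⟨h1, h2⟩ := hblank
      cases htool : pvIsTool s with
      | true =>
        rw [if_pos rfl, ih]
        cases ft <;>
          simp [pvFindToolIdx, htool, h1, h2, hfind1, Option.or_assoc] <;>
          cases hprog : pvIsProg s <;> simp
      | false =>
        cases ft with
        | true =>
          rw [if_pos rfl, ih]
          simp [h1, h2, hfind1, Option.or_assoc]
          cases hprog : pvIsProg s <;> simp
        | false =>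
          rw [if_neg (by simp), ih]
          simp [pvFindToolIdx, htool, List.drop_succ_cons, hfind1, Option.or_assoc]
          cases hprog : pvIsProg s <;> simp

-- ===== VERDICT (by name: the statement is the Claim_ definition above) =====
theorem strip_preamble_spec : Claim_equal_strip_preamble := by
  intro lines _
  unfold Spec_strip_preamble strip_preamble strip_preamble_alt
  rw [pvFold_inv]
  simp only [List.nil_append, Option.or_none]
  cases h : (lines.map PySem.Str.strip).reverse.find? pvIsProg <;> simp
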